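-- pv_equiv track=rewrite | github.com/Magloire07/ten_fast_finger_automation | rpa.py | replace_newline_sequences
-- ===== SOURCE A (Python) =====
-- def replace_newline_sequences(chars):
--     result = []
--     i = 0
--     while i < len(chars):
--         if i + 1 < len(chars) and chars[i] == '\n' and chars[i + 1] == '\n':
--             result.append(' ')
--             result.append('\n')
--             i += 2  # Skip the next '\n'
--         else:
--             result.append(chars[i])
--             i += 1
--     return result
-- ===== SOURCE B (Python) =====
-- def replace_newline_sequences(chars):
--     # Run-length pass: group maximal runs of equal elements; a newline run of
--     # length L becomes L//2 copies of [' ', '\n'] plus an odd leftover '\n'.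
--     result = []
--     n = len(chars)
--     i = 0
--     while i < n:
--         x = chars[i]
--         j = i
--         while j < n and chars[j] == x:
--             j += 1
--         L = j - i
--         if x == '\n':
--             result.extend([' ', '\n'] * (L // 2))
--             if L % 2:
--                 result.append('\n')
--         else:
--             result.extend(chars[i:j])
--         i = j
--     return result
-- ===== Notes on version B (the rewrite author's own statement) =====
-- stated objective: alternative
-- what changed: Replaces A's index-stepping pairwise scan with a run-length (groupby-style) pass: each maximal run of equal elements is handled at once, a newline run of length L emitting L//2 space-newline pairs plus an odd leftover newline, other runs copied unchanged.
import Mathlib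
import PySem

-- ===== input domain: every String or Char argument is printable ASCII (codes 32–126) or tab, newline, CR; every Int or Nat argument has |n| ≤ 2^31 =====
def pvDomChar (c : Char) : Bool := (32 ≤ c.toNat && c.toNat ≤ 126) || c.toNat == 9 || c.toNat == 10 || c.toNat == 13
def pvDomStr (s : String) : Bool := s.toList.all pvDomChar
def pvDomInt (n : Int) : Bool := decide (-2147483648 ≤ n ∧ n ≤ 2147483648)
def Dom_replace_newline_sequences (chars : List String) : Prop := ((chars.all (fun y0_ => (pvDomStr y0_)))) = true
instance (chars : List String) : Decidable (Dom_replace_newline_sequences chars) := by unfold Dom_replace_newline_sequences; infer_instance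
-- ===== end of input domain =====

-- B replaces A's pairwise index-stepping scan with a run-length (groupby-style) pass; alternative decomposition, same cost.


-- ===== PORT A =====
-- A's while loop over index i, consuming 2 elements on a "\n","\n" pair, else 1.
def pvLoopA : List String → List String
  | [] => []
  | [a] => [a]
  | a :: b :: rest =>
    if a = "\n" ∧ b = "\n" then " " :: "\n" :: pvLoopA rest
    else a :: pvLoopA (b :: rest)

def replace_newline_sequences (chars : List String) : List String := pvLoopA chars

-- ===== PORT B =====
-- output for one maximal newline run of length L: L/2 copies of [" ", "\n"] plus an odd leftover "\n"
def pvEmitNl (L : Nat) : List String :=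
  (List.replicate (L / 2) [" ", "\n"]).flatten ++ (if L % 2 = 1 then ["\n"] else [])

-- B's outer while loop: peel off one maximal run of equal elements per step.
def pvLoopB : List String → List String
  | [] => []
  | x :: xs =>
    let run := xs.takeWhile (· == x)
    let rest := xs.dropWhile (· == x)
    let L := run.length + 1
    (if x = "\n" then pvEmitNl L else List.replicate L x) ++ pvLoopB rest
termination_by l => l.length
decreasing_by
  have := List.length_dropWhile_le (· == x) xs
  simp; omega

def replace_newline_sequences_alt (chars : List String) : List String := pvLoopB chars

-- ===== PRECONDITION & SPEC =====
def Spec_replace_newline_sequences (chars : List String) (out : List String) : Prop := out = replace_newline_sequences_alt chars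
instance (chars : List String) (out : List String) : Decidable (Spec_replace_newline_sequences chars out) := by unfold Spec_replace_newline_sequences; infer_instance

-- ===== CLAIM (what is proved, stated in full; the proofs are below) =====
def Claim_equal_replace_newline_sequences : Prop := ∀ (chars : List String), Dom_replace_newline_sequences chars → Spec_replace_newline_sequences chars (replace_newline_sequences chars)

-- ===== LEMMAS AND PROOFS =====

-- A on a run of n copies of a non-newline element passes it through unchanged.
theorem pvLoopA_other (x : String) (hx : x ≠ "\n") :
    ∀ (n : Nat) (rest : List String),
      pvLoopA (List.replicate n x ++ rest) = List.replicate n x ++ pvLoopA rest := by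
  intro n
  induction n with
  | zero => intro rest; simp
  | succ n ih =>
    intro rest
    rcases h : List.replicate n x ++ rest with _ | ⟨b, r⟩
    · rcases List.append_eq_nil_iff.mp h with ⟨h1, h2⟩
      have hn : n = 0 := by simpa using congrArg List.length h1
      subst hn h2
      simp [pvLoopA]
    · simp only [List.replicate_succ, List.cons_append, h, pvLoopA]
      rw [if_neg (by tauto)]
      rw [← h, ih]

-- A on a maximal run of n newlines emits pvEmitNl n.
theorem pvLoopA_nl :
    ∀ (n : Nat) (rest : List String), rest.head? ≠ some "\n" →
      pvLoopA (List.replicate n "\n" ++ rest) = pvEmitNl n ++ pvLoopA rest := by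
  intro n
  induction n using Nat.strong_induction_on with
  | _ n ih =>
    match n with
    | 0 => intro rest _; simp [pvEmitNl]
    | 1 =>
      intro rest hrest
      rcases rest with _ | ⟨b, r⟩
      · simp [pvLoopA, pvEmitNl]
      · have hb : b ≠ "\n" := by
          intro h; exact hrest (by simp [h])
        simp only [List.replicate, List.cons_append, List.nil_append, pvLoopA]
        rw [if_neg (by tauto)]
        simp [pvEmitNl]
    | (n + 2) =>
      intro rest hrest
      have hstep : pvLoopA (List.replicate (n + 2) "\n" ++ rest)
          = " " :: "\n" :: pvLoopA (List.replicate n "\n" ++ rest) := by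
        simp only [List.replicate_succ, List.cons_append, pvLoopA]
        simp
      rw [hstep, ih n (by omega) rest hrest]
      have hemit : pvEmitNl (n + 2) = " " :: "\n" :: pvEmitNl n := by
        unfold pvEmitNl
        have h2 : (n + 2) / 2 = n / 2 + 1 := by omega
        have h3 : (n + 2) % 2 = n % 2 := by omega
        rw [h2, h3, List.replicate_succ]
        simp
      rw [hemit]
      simp

-- the takeWhile prefix of a run is literally a replicate
theorem pvTakeWhile_replicate (x : String) (xs : List String) :
    xs.takeWhile (· == x) = List.replicate (xs.takeWhile (· == x)).length x := by
  rw [List.eq_replicate_iff]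
  refine ⟨rfl, ?_⟩
  intro b hb
  have h2 := List.mem_takeWhile_imp (p := fun y => y == x) (l := xs) hb
  exact eq_of_beq h2

theorem pvHead?_dropWhile (p : String → Bool) :
    ∀ (xs : List String) (b : String), (xs.dropWhile p).head? = some b → p b = false := by
  intro xs
  induction xs with
  | nil => intro b h; simp at h
  | cons a t ih =>
    intro b h
    by_cases hp : p a
    · exact ih b (by simpa [List.dropWhile_cons, hp] using h)
    · have hpa : p a = false := by simpa using hp
      simp [hpa] at h
      rw [← h]; exact hpa

theorem pvLoopAB : ∀ (l : List String), pvLoopA l = pvLoopB l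
  | [] => by simp [pvLoopA, pvLoopB]
  | x :: xs => by
    have hsplit : x :: xs
        = List.replicate ((xs.takeWhile (· == x)).length + 1) x ++ xs.dropWhile (· == x) := by
      conv_lhs => rw [← List.takeWhile_append_dropWhile (p := (· == x)) (l := xs)]
      rw [List.replicate_succ, List.cons_append]
      rw [← pvTakeWhile_replicate]
    have ihrest := pvLoopAB (xs.dropWhile (· == x))
    by_cases hx : x = "\n"
    · subst hx
      have hhead : (xs.dropWhile (· == "\n")).head? ≠ some "\n" := by
        intro h
        have := pvHead?_dropWhile (· == "\n") xs "\n" h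
        simp at this
      conv_lhs => rw [hsplit]
      rw [pvLoopA_nl _ _ hhead, ihrest, pvLoopB]
      simp
    · conv_lhs => rw [hsplit]
      rw [pvLoopA_other x hx, ihrest, pvLoopB]
      simp [hx]
termination_by l => l.length
decreasing_by
  all_goals
    have := List.length_dropWhile_le (· == x) xs
    simp; omega

-- ===== VERDICT (by name: the statement is the Claim_ definition above) =====
theorem replace_newline_sequences_spec : Claim_equal_replace_newline_sequences := by
  intro chars _
  unfold Spec_replace_newline_sequences replace_newline_sequences replace_newline_sequences_alt
  exact pvLoopAB chars
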